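-- pv_equiv track=rewrite | github.com/Albert-learner/Algorithm | Programmers/LEVEL1/StringSplit.py | solution
-- ===== SOURCE A (Python) =====
-- def solution(s):
--     answer = 0
--
--     first_alp = ''
--     fir_alp_same_cnt = 0
--     diff_cnt = 0
--     for sub_s in s:
--         if first_alp == '':
--             first_alp = sub_s
--             fir_alp_same_cnt = 1
--             continue
--
--         if first_alp == sub_s:
--             fir_alp_same_cnt += 1
--         else:
--             diff_cnt += 1
--
--         if fir_alp_same_cnt == diff_cnt:
--             first_alp = ''
--             fir_alp_same_cnt = 0
--             diff_cnt = 0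
--             answer += 1
--
--     if first_alp != '':
--         answer += 1
--     return answer
-- ===== SOURCE B (Python) =====
-- def solution(s):
--     # Every completed fragment has even length (the match/mismatch balance has the
--     # parity of the number of chars read, so it can only return to 0 on even steps),
--     # hence all fragments start at even indices and we can consume the string two
--     # characters per step, keeping one balance counter in units of pairs.
--     count = 0
--     pivot = None
--     bal = 0
--     n = len(s)
--     for i in range(0, n - 1, 2):
--         a, b = s[i], s[i + 1]
--         if pivot is None:
--             pivot, bal = a, 0
--         bal += (a == pivot) + (b == pivot) - 1
--         if bal == 0:
--             count += 1
--             pivot = None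
--     if pivot is not None or n % 2 == 1:
--         count += 1
--     return count
-- ===== Notes on version B (the rewrite author's own statement) =====
-- stated objective: alternative
-- what changed: B replaces A's per-character loop over a (pivot, same-count, diff-count) state by a two-characters-per-step scan: since a completed fragment's match/mismatch balance can only return to zero after an even number of characters, fragments always start at even indices, so B consumes the string in pairs maintaining a single pair-level balance counter.
import Mathlib
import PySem

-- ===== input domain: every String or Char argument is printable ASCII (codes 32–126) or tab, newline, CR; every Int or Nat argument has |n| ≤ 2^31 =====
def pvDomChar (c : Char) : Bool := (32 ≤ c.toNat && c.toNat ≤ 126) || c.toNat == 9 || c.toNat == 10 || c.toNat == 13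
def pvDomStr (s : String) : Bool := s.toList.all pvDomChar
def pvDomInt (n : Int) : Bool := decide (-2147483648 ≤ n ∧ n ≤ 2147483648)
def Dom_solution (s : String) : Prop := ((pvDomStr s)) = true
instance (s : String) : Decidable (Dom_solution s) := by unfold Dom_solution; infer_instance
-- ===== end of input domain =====

-- B consumes the string two characters per step (every completed fragment has even
-- length, so fragments always start at even indices), keeping one pair-level balance
-- counter instead of A's per-character same/diff pair (objective: alternative).

-- ===== PORT A =====
-- state = (answer, first_alp as Option Char ('' = none), fir_alp_same_cnt, diff_cnt)
def pvStepA (st : Int × Option Char × Int × Int) (c : Char) : Int × Option Char × Int × Int :=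
  match st with
  | (ans, none, _, _) => (ans, some c, 1, 0)
  | (ans, some p, same, diff) =>
    let same' := if p = c then same + 1 else same
    let diff' := if p = c then diff else diff + 1
    if same' = diff' then (ans + 1, none, 0, 0) else (ans, some p, same', diff')

def solution (s : String) : Int :=
  match s.toList.foldl pvStepA (0, none, 0, 0) with
  | (ans, none, _, _) => ans
  | (ans, some _, _, _) => ans + 1

-- ===== PORT B =====
-- Source B's pairwise loop: state = count and optional (pivot, balance); the recursion
-- consumes two chars per step (Python's range(0, n - 1, 2)); the [_] case is the odd
-- leftover char, the [] case is Python's final 'pivot is not None' check.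
def pvB (count : Int) (pb : Option (Char × Int)) : List Char → Int
  | [] => match pb with | none => count | some _ => count + 1
  | [_] => count + 1
  | a :: b :: rest =>
    let pb' := match pb with | none => (a, (0 : Int)) | some x => x
    let bal := pb'.2 + (if a = pb'.1 then 1 else 0) + (if b = pb'.1 then 1 else 0) - 1
    if bal = 0 then pvB (count + 1) none rest else pvB count (some (pb'.1, bal)) rest

def solution_alt (s : String) : Int := pvB 0 none s.toList

-- ===== PRECONDITION & SPEC =====
def Spec_solution (s : String) (out : Int) : Prop := out = solution_alt s
instance (s : String) (out : Int) : Decidable (Spec_solution s out) := by unfold Spec_solution; infer_instance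

-- ===== CLAIM (what is proved, stated in full; the proofs are below) =====
def Claim_equal_solution : Prop := ∀ (s : String), Dom_solution s → Spec_solution s (solution s)

-- ===== LEMMAS AND PROOFS =====
def pvFinish (st : Int × Option Char × Int × Int) : Int :=
  match st with
  | (ans, none, _, _) => ans
  | (ans, some _, _, _) => ans + 1




theorem pvMain : ∀ (n : Nat) (l : List Char), l.length ≤ n → ∀ (ans : Int),
    (pvFinish (l.foldl pvStepA (ans, none, 0, 0)) = pvB ans none l)
    ∧ (∀ (p : Char) (same diff bal : Int), same - diff = 2 * bal → 0 < bal →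
        pvFinish (l.foldl pvStepA (ans, some p, same, diff)) = pvB ans (some (p, bal)) l) := by
  intro n
  induction n with
  | zero =>
    intro l hl ans
    have : l = [] := List.eq_nil_of_length_eq_zero (Nat.le_zero.mp hl)
    subst this
    exact ⟨rfl, fun _ _ _ _ _ _ => rfl⟩
  | succ n ih =>
    intro l hl ans
    match l with
    | [] => exact ⟨rfl, fun _ _ _ _ _ _ => rfl⟩
    | [c] =>
      constructor
      · simp [pvB, pvStepA, pvFinish]
      · intro p same diff bal hsd hb
        simp only [List.foldl_cons, List.foldl_nil, pvStepA, pvB]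
        split_ifs with h1 <;> simp_all [pvFinish]
    | a :: b :: rest =>
      have hr : rest.length ≤ n := by
        simp only [List.length_cons] at hl; omega
      constructor
      · -- fragment start: pivot := a, then read b
        rw [List.foldl_cons, List.foldl_cons]
        have h1 : pvStepA (ans, none, 0, 0) a = (ans, some a, 1, 0) := rfl
        rw [h1]
        simp only [pvB, if_true]
        by_cases hab : a = b
        · have h2 : pvStepA (ans, some a, 1, 0) b = (ans, some a, 1 + 1, 0) := by
            simp only [pvStepA, if_pos hab]
            rw [if_neg (by omega : ¬ ((1 : Int) + 1 = 0))]
          rw [h2, if_pos hab.symm]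
          have hc : (0 : Int) + 1 + 1 - 1 = 1 := by ring
          rw [hc, if_neg (by omega : ¬ ((1 : Int) = 0))]
          exact (ih rest hr ans).2 a (1 + 1) 0 1 (by omega) (by omega)
        · have hba : ¬ (b = a) := fun h => hab h.symm
          have h2 : pvStepA (ans, some a, 1, 0) b = (ans + 1, none, 0, 0) := by
            simp only [pvStepA, if_neg hab]
            rw [if_pos (by omega : (1 : Int) = 0 + 1)]
          rw [h2, if_neg hba]
          have hc : (0 : Int) + 1 + 0 - 1 = 0 := by ring
          rw [hc, if_pos rfl]
          exact (ih rest hr (ans + 1)).1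
      · intro p same diff bal hsd hb
        rw [List.foldl_cons, List.foldl_cons]
        simp only [pvB]
        by_cases hpa : p = a <;> by_cases hpb : p = b
        · have h1 : pvStepA (ans, some p, same, diff) a = (ans, some p, same + 1, diff) := by
            simp only [pvStepA, if_pos hpa]
            rw [if_neg (by omega : ¬ (same + 1 = diff))]
          have h2 : pvStepA (ans, some p, same + 1, diff) b = (ans, some p, same + 1 + 1, diff) := by
            simp only [pvStepA, if_pos hpb]
            rw [if_neg (by omega : ¬ (same + 1 + 1 = diff))]
          rw [h1, h2, if_pos hpa.symm, if_pos hpb.symm]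
          have hc : bal + 1 + 1 - 1 = bal + 1 := by ring
          rw [hc, if_neg (by omega : ¬ (bal + 1 = 0))]
          exact (ih rest hr ans).2 p (same + 1 + 1) diff (bal + 1) (by omega) (by omega)
        · have hbp : ¬ (b = p) := fun h => hpb h.symm
          have h1 : pvStepA (ans, some p, same, diff) a = (ans, some p, same + 1, diff) := by
            simp only [pvStepA, if_pos hpa]
            rw [if_neg (by omega : ¬ (same + 1 = diff))]
          have h2 : pvStepA (ans, some p, same + 1, diff) b = (ans, some p, same + 1, diff + 1) := by
            simp only [pvStepA, if_neg hpb]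
            rw [if_neg (by omega : ¬ (same + 1 = diff + 1))]
          rw [h1, h2, if_pos hpa.symm, if_neg hbp]
          have hc : bal + 1 + 0 - 1 = bal := by ring
          rw [hc, if_neg (by omega : ¬ (bal = 0))]
          exact (ih rest hr ans).2 p (same + 1) (diff + 1) bal (by omega) hb
        · have hap : ¬ (a = p) := fun h => hpa h.symm
          have h1 : pvStepA (ans, some p, same, diff) a = (ans, some p, same, diff + 1) := by
            simp only [pvStepA, if_neg hpa]
            rw [if_neg (by omega : ¬ (same = diff + 1))]
          have h2 : pvStepA (ans, some p, same, diff + 1) b = (ans, some p, same + 1, diff + 1) := by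
            simp only [pvStepA, if_pos hpb]
            rw [if_neg (by omega : ¬ (same + 1 = diff + 1))]
          rw [h1, h2, if_neg hap, if_pos hpb.symm]
          have hc : bal + 0 + 1 - 1 = bal := by ring
          rw [hc, if_neg (by omega : ¬ (bal = 0))]
          exact (ih rest hr ans).2 p (same + 1) (diff + 1) bal (by omega) hb
        · have hap : ¬ (a = p) := fun h => hpa h.symm
          have hbp : ¬ (b = p) := fun h => hpb h.symm
          have h1 : pvStepA (ans, some p, same, diff) a = (ans, some p, same, diff + 1) := by
            simp only [pvStepA, if_neg hpa]
            rw [if_neg (by omega : ¬ (same = diff + 1))]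
          rw [h1, if_neg hap, if_neg hbp]
          have hc : bal + 0 + 0 - 1 = bal - 1 := by ring
          rw [hc]
          by_cases hone : bal = 1
          · -- the fragment ends exactly here: both sides reset
            have h2 : pvStepA (ans, some p, same, diff + 1) b = (ans + 1, none, 0, 0) := by
              simp only [pvStepA, if_neg hpb]
              rw [if_pos (by omega : same = diff + 1 + 1)]
            rw [h2, if_pos (by omega : bal - 1 = 0)]
            exact (ih rest hr (ans + 1)).1
          · have h2 : pvStepA (ans, some p, same, diff + 1) b = (ans, some p, same, diff + 1 + 1) := by
              simp only [pvStepA, if_neg hpb]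
              rw [if_neg (by omega : ¬ (same = diff + 1 + 1))]
            rw [h2, if_neg (by omega : ¬ (bal - 1 = 0))]
            exact (ih rest hr ans).2 p same (diff + 1 + 1) (bal - 1) (by omega) (by omega)

-- ===== VERDICT (by name: the statement is the Claim_ definition above) =====
theorem solution_spec : Claim_equal_solution := by
  intro s _
  unfold Spec_solution solution solution_alt
  have h := (pvMain s.toList.length s.toList le_rfl 0).1
  rcases hst : s.toList.foldl pvStepA (0, none, 0, 0) with ⟨ans, fa, same, diff⟩
  rw [hst] at h
  cases fa <;> simpa [pvFinish] using h
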